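-- pv_equiv track=rewrite | github.com/salchaD-27/problemSolving_alsoDA | LeetCode/672_M_Bulb_Switcher_2.py | flipLights
-- ===== SOURCE A (Python) =====
-- from itertools import product
--
-- def flipLights(n: int, presses: int) -> int:
--     if presses == 0: return 1
--     n = min(n, 6)
--     seen = set()
--     for b1, b2, b3, b4 in product([0, 1], repeat=4):
--         total = b1 + b2 + b3 + b4
--         if total > presses or (total % 2 != presses % 2): continue
--         bulbs = [1] * n
--         for i in range(n):
--             if b1: bulbs[i] ^= 1
--             if b2 and (i + 1) % 2 == 0: bulbs[i] ^= 1
--             if b3 and (i + 1) % 2 == 1: bulbs[i] ^= 1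
--             if b4 and (i + 1) % 3 == 1: bulbs[i] ^= 1
--         seen.add(tuple(bulbs))
--     return len(seen)
-- ===== SOURCE B (Python) =====
-- def flipLights(n: int, presses: int) -> int:
--     # Closed-form case analysis instead of enumerating button combinations.
--     if presses == 0:
--         return 1
--     if presses < 0:
--         return 0
--     if n <= 0:
--         return 1
--     if n == 1:
--         return 2
--     if n == 2:
--         return 3 if presses == 1 else 4
--     return 4 if presses == 1 else (7 if presses == 2 else 8)
-- ===== Notes on version B (the rewrite author's own statement) =====
-- stated objective: simpler
-- what changed: Replaced the 16-combination enumeration that simulates up to 6 bulbs and collects states in a set with the textbook closed-form case table on n and presses (pure branching, no loops or sets).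
import Mathlib
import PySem

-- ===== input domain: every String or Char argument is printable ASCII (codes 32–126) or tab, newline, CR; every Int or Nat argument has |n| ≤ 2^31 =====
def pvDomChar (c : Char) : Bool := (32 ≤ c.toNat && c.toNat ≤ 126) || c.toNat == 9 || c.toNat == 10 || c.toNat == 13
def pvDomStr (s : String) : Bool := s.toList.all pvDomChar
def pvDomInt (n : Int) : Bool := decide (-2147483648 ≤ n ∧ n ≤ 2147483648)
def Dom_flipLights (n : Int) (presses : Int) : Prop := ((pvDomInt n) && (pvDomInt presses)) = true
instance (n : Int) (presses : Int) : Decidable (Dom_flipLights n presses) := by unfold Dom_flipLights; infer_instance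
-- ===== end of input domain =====

-- B replaces A's 16-combination enumeration with the textbook closed-form case table (objective: simpler).

-- ===== PORT A =====
-- product([0,1], repeat=4), in itertools order (last component varies fastest)
def pvCombos : List (Int × Int × Int × Int) :=
  [(0,0,0,0),(0,0,0,1),(0,0,1,0),(0,0,1,1),
   (0,1,0,0),(0,1,0,1),(0,1,1,0),(0,1,1,1),
   (1,0,0,0),(1,0,0,1),(1,0,1,0),(1,0,1,1),
   (1,1,0,0),(1,1,0,1),(1,1,1,0),(1,1,1,1)]

-- the inner loop: bulbs = [1]*n; for i in range(n): conditional xors at index i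
-- (i from range(n) is nonnegative and in range, so List.modify at i.toNat is exact;
--  % has positive literal divisors 2 and 3 here, where Python % coincides with Lean's emod)
def pvBulbs (b1 b2 b3 b4 m : Int) : List Int :=
  (PySem.List.pyRange 0 m 1).foldl (fun bulbs i =>
    let bulbs := if b1 ≠ 0 then bulbs.modify i.toNat (fun v => Int.xor v 1) else bulbs
    let bulbs := if b2 ≠ 0 ∧ (i+1) % 2 = 0 then bulbs.modify i.toNat (fun v => Int.xor v 1) else bulbs
    let bulbs := if b3 ≠ 0 ∧ (i+1) % 2 = 1 then bulbs.modify i.toNat (fun v => Int.xor v 1) else bulbs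
    let bulbs := if b4 ≠ 0 ∧ (i+1) % 3 = 1 then bulbs.modify i.toNat (fun v => Int.xor v 1) else bulbs
    bulbs) (List.replicate m.toNat 1)

-- the body after the presses==0 guard, with n already replaced by min(n,6)
-- (total ≥ 0 and presses % 2 with... total % 2: divisor 2 > 0, Python % = emod)
def flipLightsCore (m presses : Int) : Int :=
  let seen : PySem.Set (List Int) :=
    pvCombos.foldl (fun seen bs =>
      let total := bs.1 + bs.2.1 + bs.2.2.1 + bs.2.2.2
      if total > presses ∨ ¬ (total % 2 = presses % 2) then seen
      else PySem.Set.add seen (pvBulbs bs.1 bs.2.1 bs.2.2.1 bs.2.2.2 m))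
      PySem.Set.empty
  (seen.length : Int)

def flipLights (n : Int) (presses : Int) : Int :=
  if presses = 0 then 1 else flipLightsCore (min n 6) presses

-- ===== PORT B =====
def flipLights_alt (n : Int) (presses : Int) : Int :=
  if presses = 0 then 1
  else if presses < 0 then 0
  else if n ≤ 0 then 1
  else if n = 1 then 2
  else if n = 2 then (if presses = 1 then 3 else 4)
  else if presses = 1 then 4
  else if presses = 2 then 7
  else 8

-- ===== PRECONDITION & SPEC =====
def Spec_flipLights (n : Int) (presses : Int) (out : Int) : Prop := out = flipLights_alt n presses
instance (n : Int) (presses : Int) (out : Int) : Decidable (Spec_flipLights n presses out) := by unfold Spec_flipLights; infer_instance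

-- ===== CLAIM (what is proved, stated in full; the proofs are below) =====
def Claim_equal_flipLights : Prop := ∀ (n : Int) (presses : Int), Dom_flipLights n presses → Spec_flipLights n presses (flipLights n presses)

-- ===== LEMMAS AND PROOFS =====

-- normalization: both programs depend on n only through its class among {≤0, 1..5, ≥6}
-- and on presses only through its class among {<0, 0, 1..5, ≥6-even, ≥6-odd}
def pvNormN (n : Int) : Int := if n ≤ 0 then 0 else if 6 ≤ n then 6 else n
def pvNormP (p : Int) : Int := if p < 0 then -1 else if p ≤ 5 then p else if p % 2 = 0 then 4 else 5

theorem pvBulbs_nonpos (b1 b2 b3 b4 m : Int) (hm : m ≤ 0) : pvBulbs b1 b2 b3 b4 m = [] := by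
  unfold pvBulbs
  rw [PySem.List.pyRange_one]
  simp [show m.toNat = 0 from by omega]

theorem core_neg (m p : Int) (hp : p < 0) : flipLightsCore m p = 0 := by
  simp [flipLightsCore, pvCombos,
    show (0:Int) > p from by omega, show (1:Int) > p from by omega,
    show (2:Int) > p from by omega, show (3:Int) > p from by omega,
    show (4:Int) > p from by omega]

theorem core_nonpos_n (m p : Int) (hm : m ≤ 0) : flipLightsCore m p = flipLightsCore 0 p := by
  simp only [flipLightsCore, pvBulbs_nonpos _ _ _ _ _ hm, pvBulbs_nonpos _ _ _ _ _ (le_refl 0)]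

set_option maxHeartbeats 4000000 in
theorem core_big_p (m p : Int) (hp : 6 ≤ p) :
    flipLightsCore m p = flipLightsCore m (if p % 2 = 0 then 4 else 5) := by
  have h2 := Int.emod_two_eq p
  have h0 : ¬ ((0:Int) > p) := by omega
  have h1 : ¬ ((1:Int) > p) := by omega
  have h2' : ¬ ((2:Int) > p) := by omega
  have h3 : ¬ ((3:Int) > p) := by omega
  have h4 : ¬ ((4:Int) > p) := by omega
  rcases h2 with h | h <;>
    simp [flipLightsCore, pvCombos, h, h0, h1, h2', h3, h4]

theorem flipLights_norm (n p : Int) : flipLights n p = flipLights (pvNormN n) (pvNormP p) := by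
  by_cases hp0 : p = 0
  · simp [flipLights, pvNormP, hp0]
  · have hptrue : pvNormP p ≠ 0 := by
      unfold pvNormP; split_ifs <;> omega
    rw [flipLights, flipLights, if_neg hp0, if_neg hptrue]
    have hmin : min (pvNormN n) 6 = pvNormN n := by unfold pvNormN; split_ifs <;> omega
    rw [hmin]
    -- n side
    have hn : flipLightsCore (min n 6) p = flipLightsCore (pvNormN n) p := by
      by_cases hn0 : n ≤ 0
      · rw [core_nonpos_n _ p (by omega), pvNormN, if_pos hn0]
      · by_cases hn6 : 6 ≤ n
        · have : min n 6 = 6 := by omega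
          rw [this]; unfold pvNormN; rw [if_neg hn0, if_pos hn6]
        · have : min n 6 = n := by omega
          rw [this]; unfold pvNormN; rw [if_neg hn0, if_neg hn6]
    rw [hn]
    -- p side
    by_cases hpneg : p < 0
    · rw [core_neg _ _ hpneg, core_neg _ _ (by rw [pvNormP, if_pos hpneg]; omega)]
    · by_cases hp5 : p ≤ 5
      · have : pvNormP p = p := by unfold pvNormP; rw [if_neg hpneg, if_pos hp5]
        rw [this]
      · have hp6 : 6 ≤ p := by omega
        rw [core_big_p _ _ hp6]
        have : pvNormP p = if p % 2 = 0 then 4 else 5 := by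
          unfold pvNormP; rw [if_neg hpneg, if_neg hp5]
        rw [this]

set_option maxHeartbeats 4000000 in
theorem flipLights_alt_norm (n p : Int) : flipLights_alt n p = flipLights_alt (pvNormN n) (pvNormP p) := by
  unfold flipLights_alt pvNormN pvNormP
  split_ifs <;> first | exact ‹False›.elim | omega

-- ===== VERDICT (by name: the statement is the Claim_ definition above) =====
set_option maxHeartbeats 2000000 in
theorem flipLights_spec : Claim_equal_flipLights := by
  intro n p _
  unfold Spec_flipLights
  rw [flipLights_norm, flipLights_alt_norm]
  have hn : 0 ≤ pvNormN n ∧ pvNormN n ≤ 6 := by unfold pvNormN; split_ifs <;> omega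
  have hp : -1 ≤ pvNormP p ∧ pvNormP p ≤ 5 := by unfold pvNormP; split_ifs <;> omega
  obtain ⟨hn1, hn2⟩ := hn
  obtain ⟨hp1, hp2⟩ := hp
  set a := pvNormN n with ha
  set b := pvNormP p with hb
  clear_value a b
  interval_cases a <;> interval_cases b <;> decide
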